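-- pv_equiv track=rewrite | github.com/jacobjennings/clarification | layer_calculator.py | predict_clarification_dense_params
-- ===== SOURCE A (Python) =====
-- def predict_clarification_dense_params(layer_sizes, num_output_convblocks=2):
--     total_params = 0
--
--     # First layer
--     total_params += (layer_sizes[0] * 1 * 3 + layer_sizes[0]) * 2  # Conv1d + BatchNorm1d
--     total_params += layer_sizes[0]  # Bias term for Conv1d
--
--     # Down layers
--     for i in range(len(layer_sizes) // 2):
--         in_channels = sum(layer_sizes[:i+1])
--         out_channels = layer_sizes[i + 1]
--         total_params += (out_channels * in_channels * 3 + out_channels) * 2  # Conv1d + BatchNorm1d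
--         total_params += out_channels  # Bias term for Conv1d
--
--     # Up layers
--     for i in range(len(layer_sizes) // 2 - 1):
--         in_channels = sum(layer_sizes[:len(layer_sizes) // 2 + i + 1])
--         out_channels = layer_sizes[len(layer_sizes) // 2 + i + 1]
--         total_params += (out_channels * in_channels * 3 + out_channels) * 2  # Conv1d + BatchNorm1d
--         total_params += out_channels  # Bias term for Conv1d
--
--     # Out layer
--     in_channels = sum(layer_sizes)
--     out_channels = layer_sizes[-1]
--     total_params += (out_channels * in_channels * 2 + out_channels)  # ConvTranspose1d
--     total_params += out_channels  # Bias term for ConvTranspose1d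
--     for _ in range(num_output_convblocks - 1):
--         total_params += (out_channels * out_channels * 3 + out_channels) * 2  # Conv1d + BatchNorm1d
--         total_params += out_channels  # Bias term for Conv1d
--
--     return total_params
-- ===== SOURCE B (Python) =====
-- def predict_clarification_dense_params(layer_sizes, num_output_convblocks=2):
--     # One pass with a running prefix sum: O(n) instead of A's O(n^2).
--     total = 9 * layer_sizes[0]
--     m = 2 * (len(layer_sizes) // 2)
--     prefix = 0
--     for j, v in enumerate(layer_sizes):
--         if 1 <= j < m:
--             total += 6 * v * prefix + 3 * v
--         prefix += v
--     last = layer_sizes[-1]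
--     total += 2 * last * prefix + 2 * last
--     if num_output_convblocks > 1:
--         total += (num_output_convblocks - 1) * (6 * last * last + 3 * last)
--     return total
-- ===== Notes on version B (the rewrite author's own statement) =====
-- stated objective: faster
-- what changed: A recomputes sum(layer_sizes[:i+1]) from scratch for every down/up layer (quadratic); B makes a single enumerate pass over layer_sizes keeping a running prefix sum and folds the per-layer conv+batchnorm formula into it, adding the closed-form output-convblock term at the end.
import Mathlib
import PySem

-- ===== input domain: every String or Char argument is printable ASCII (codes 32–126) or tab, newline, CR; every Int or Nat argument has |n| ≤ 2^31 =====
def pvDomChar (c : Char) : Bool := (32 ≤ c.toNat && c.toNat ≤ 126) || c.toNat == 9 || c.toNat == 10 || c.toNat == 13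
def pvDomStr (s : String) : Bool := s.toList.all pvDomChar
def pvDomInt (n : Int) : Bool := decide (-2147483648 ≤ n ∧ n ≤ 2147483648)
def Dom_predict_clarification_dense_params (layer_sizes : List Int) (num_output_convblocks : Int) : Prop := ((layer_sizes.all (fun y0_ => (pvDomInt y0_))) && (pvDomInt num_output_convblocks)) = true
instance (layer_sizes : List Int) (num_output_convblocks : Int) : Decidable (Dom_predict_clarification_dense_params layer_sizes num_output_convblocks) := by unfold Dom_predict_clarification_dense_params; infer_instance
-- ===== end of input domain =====

-- B replaces A's per-layer recomputation of sum(layer_sizes[:i+1]) by one pass with a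
-- running prefix sum (objective: faster; a timing run measures the speed-up).

-- ===== PORT A =====
def predict_clarification_dense_params (layer_sizes : List Int) (num_output_convblocks : Int) : Int :=
  let first := PySem.List.pyGetD layer_sizes 0 0          -- layer_sizes[0]; Pre_ excludes [], where Python raises IndexError
  let t1 : Int := 0 + (first * 1 * 3 + first) * 2 + first
  let h : Int := PySem.Int.floordiv (layer_sizes.length : Int) 2
  -- Down layers
  let t2 := (PySem.List.pyRange 0 h 1).foldl (fun t i =>
    let in_channels := (PySem.List.slice layer_sizes none (some (i + 1))).sum
    let out_channels := PySem.List.pyGetD layer_sizes (i + 1) 0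
    t + (out_channels * in_channels * 3 + out_channels) * 2 + out_channels) t1
  -- Up layers
  let t3 := (PySem.List.pyRange 0 (h - 1) 1).foldl (fun t i =>
    let in_channels := (PySem.List.slice layer_sizes none (some (h + i + 1))).sum
    let out_channels := PySem.List.pyGetD layer_sizes (h + i + 1) 0
    t + (out_channels * in_channels * 3 + out_channels) * 2 + out_channels) t2
  -- Out layer
  let in_channels := layer_sizes.sum
  let out_channels := PySem.List.pyGetD layer_sizes (-1) 0
  let t4 := t3 + (out_channels * in_channels * 2 + out_channels) + out_channels
  (PySem.List.pyRange 0 (num_output_convblocks - 1) 1).foldl (fun t _ =>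
    t + (out_channels * out_channels * 3 + out_channels) * 2 + out_channels) t4

-- ===== PORT B =====
def predict_clarification_dense_params_alt (layer_sizes : List Int) (num_output_convblocks : Int) : Int :=
  let total0 : Int := 9 * PySem.List.pyGetD layer_sizes 0 0
  let m : Nat := 2 * (layer_sizes.length / 2)
  let tp := (PySem.List.enumerate layer_sizes 0).foldl
    (fun (tp : Int × Int) (jv : Int × Int) =>
      ((if 1 ≤ jv.1 ∧ jv.1 < (m : Int) then tp.1 + 6 * jv.2 * tp.2 + 3 * jv.2 else tp.1),
       tp.2 + jv.2)) (total0, 0)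
  let last := PySem.List.pyGetD layer_sizes (-1) 0
  let total := tp.1 + 2 * last * tp.2 + 2 * last
  if num_output_convblocks > 1 then
    total + (num_output_convblocks - 1) * (6 * last * last + 3 * last)
  else total

-- ===== PRECONDITION & SPEC =====
-- Python A raises IndexError on the empty list (layer_sizes[0]); B raises there too.
def Pre_predict_clarification_dense_params (layer_sizes : List Int) (num_output_convblocks : Int) : Prop := layer_sizes ≠ []
instance (layer_sizes : List Int) (num_output_convblocks : Int) : Decidable (Pre_predict_clarification_dense_params layer_sizes num_output_convblocks) := by unfold Pre_predict_clarification_dense_params; infer_instance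
def pvWitness_predict_clarification_dense_params : List Int × Int := ([4, 8, 16, 8], 2)
def Spec_predict_clarification_dense_params (layer_sizes : List Int) (num_output_convblocks : Int) (out : Int) : Prop := out = predict_clarification_dense_params_alt layer_sizes num_output_convblocks
instance (layer_sizes : List Int) (num_output_convblocks : Int) (out : Int) : Decidable (Spec_predict_clarification_dense_params layer_sizes num_output_convblocks out) := by unfold Spec_predict_clarification_dense_params; infer_instance

-- ===== CLAIM (what is proved, stated in full; the proofs are below) =====
def Claim_equal_predict_clarification_dense_params : Prop := ∀ (layer_sizes : List Int) (num_output_convblocks : Int), Dom_predict_clarification_dense_params layer_sizes num_output_convblocks → Pre_predict_clarification_dense_params layer_sizes num_output_convblocks → Spec_predict_clarification_dense_params layer_sizes num_output_convblocks (predict_clarification_dense_params layer_sizes num_output_convblocks)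

-- ===== LEMMAS AND PROOFS =====

-- per-layer parameter count in B's shape: out = ls[j], prefix = sum ls[:j]
def pvG (ls : List Int) (j : Nat) : Int := 6 * ls.getD j 0 * (ls.take j).sum + 3 * ls.getD j 0

lemma pv_foldl_add_of {α : Type} (l : List α) (f : Int → α → Int) (g : α → Int)
    (h : ∀ acc x, x ∈ l → f acc x = acc + g x) (t : Int) :
    l.foldl f t = t + (l.map g).sum := by
  rw [PySem.List.foldl_congr_mem _ _ _ _ h, PySem.List.foldl_add]

lemma pv_pyRange_cast (n : Nat) :
    PySem.List.pyRange 0 (n : Int) 1 = (List.range n).map (fun (k : Nat) => (k : Int)) := by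
  rw [PySem.List.pyRange_one]
  simp only [sub_zero, Int.toNat_natCast, zero_add]

lemma pv_upRange (hN : Nat) :
    PySem.List.pyRange 0 ((hN : Int) - 1) 1 = (List.range (hN - 1)).map (fun (k : Nat) => (k : Int)) := by
  rcases Nat.eq_zero_or_pos hN with h | h
  · subst h
    rw [PySem.List.pyRange_one_eq_nil (by norm_num)]
    simp
  · have e : ((hN : Int) - 1) = ((hN - 1 : Nat) : Int) := by omega
    rw [e, pv_pyRange_cast]

-- A's down loop, characterised
lemma pv_downFold (ls : List Int) (hN : Nat) (t : Int) :
    ((List.range hN).map (fun (k : Nat) => (k : Int))).foldl (fun t i =>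
      t + (PySem.List.pyGetD ls (i + 1) 0 * (PySem.List.slice ls none (some (i + 1))).sum * 3
            + PySem.List.pyGetD ls (i + 1) 0) * 2 + PySem.List.pyGetD ls (i + 1) 0) t
    = t + ((List.range hN).map (fun k => pvG ls (k + 1))).sum := by
  rw [List.foldl_map]
  refine pv_foldl_add_of _ _ _ (fun acc k _ => ?_) t
  have e : ((k : Int) + 1) = ((k + 1 : Nat) : Int) := by push_cast; ring
  rw [e, PySem.List.pyGetD_natCast, PySem.List.slice_to_natCast]
  simp only [pvG]
  ring

-- A's up loop, characterised
lemma pv_upFold (ls : List Int) (hN : Nat) (t : Int) :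
    ((List.range (hN - 1)).map (fun (k : Nat) => (k : Int))).foldl (fun t i =>
      t + (PySem.List.pyGetD ls ((hN : Int) + i + 1) 0
            * (PySem.List.slice ls none (some ((hN : Int) + i + 1))).sum * 3
            + PySem.List.pyGetD ls ((hN : Int) + i + 1) 0) * 2
        + PySem.List.pyGetD ls ((hN : Int) + i + 1) 0) t
    = t + ((List.range (hN - 1)).map (fun k => pvG ls (hN + k + 1))).sum := by
  rw [List.foldl_map]
  refine pv_foldl_add_of _ _ _ (fun acc k _ => ?_) t
  have e : ((hN : Int) + (k : Int) + 1) = ((hN + k + 1 : Nat) : Int) := by push_cast; ring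
  rw [e, PySem.List.pyGetD_natCast, PySem.List.slice_to_natCast]
  simp only [pvG]
  ring

-- A's trailing constant loop, characterised
lemma pv_constFold (b c t : Int) :
    (PySem.List.pyRange 0 b 1).foldl (fun t _ => t + (c * c * 3 + c) * 2 + c) t
    = t + (b.toNat : Int) * ((c * c * 3 + c) * 2 + c) := by
  rw [pv_foldl_add_of _ _ (fun _ => (c * c * 3 + c) * 2 + c) (fun acc x _ => by ring) t,
    PySem.List.sum_map_const_int, PySem.List.length_pyRange_one, sub_zero]

-- B's single fold, characterised: total picks up the guarded per-index terms, prefix the sum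
lemma pv_foldB (m : Nat) (tail : List Int) : ∀ (s t p : Int),
    (PySem.List.enumerate tail s).foldl
      (fun (tp : Int × Int) (jv : Int × Int) =>
        ((if 1 ≤ jv.1 ∧ jv.1 < (m : Int) then tp.1 + 6 * jv.2 * tp.2 + 3 * jv.2 else tp.1),
         tp.2 + jv.2)) (t, p)
    = (t + ((List.range tail.length).map (fun (i : Nat) =>
          if 1 ≤ s + (i : Int) ∧ s + (i : Int) < (m : Int) then
            6 * tail.getD i 0 * (p + (tail.take i).sum) + 3 * tail.getD i 0
          else 0)).sum,
       p + tail.sum) := by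
  induction tail with
  | nil => intro s t p; simp [PySem.List.enumerate]
  | cons v rest ih =>
    intro s t p
    rw [PySem.List.enumerate_cons, List.foldl_cons]
    dsimp only
    rw [ih]
    have hmap : ((List.range rest.length).map (fun (i : Nat) =>
          if 1 ≤ (s + 1) + (i : Int) ∧ (s + 1) + (i : Int) < (m : Int) then
            6 * rest.getD i 0 * ((p + v) + (rest.take i).sum) + 3 * rest.getD i 0
          else 0)) = ((List.range rest.length).map (fun (i : Nat) =>
          if 1 ≤ s + ((i + 1 : Nat) : Int) ∧ s + ((i + 1 : Nat) : Int) < (m : Int) then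
            6 * (v :: rest).getD (i + 1) 0 * (p + ((v :: rest).take (i + 1)).sum)
              + 3 * (v :: rest).getD (i + 1) 0
          else 0)) := by
      refine List.map_congr_left (fun i _ => ?_)
      have hc : (1 ≤ (s + 1) + (i : Int) ∧ (s + 1) + (i : Int) < (m : Int)) ↔
          (1 ≤ s + ((i + 1 : Nat) : Int) ∧ s + ((i + 1 : Nat) : Int) < (m : Int)) := by
        push_cast; constructor <;> (intro h; omega)
      rw [if_congr hc rfl rfl]
      split_ifs with h
      · simp only [List.getD_cons_succ, List.take_succ_cons, List.sum_cons]; ring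
      · rfl
    rw [hmap]
    simp only [Prod.mk.injEq, List.length_cons, List.range_succ_eq_map, List.map_cons,
      List.sum_cons, List.map_map, Function.comp_def, Nat.succ_eq_add_one,
      Nat.cast_zero, add_zero, List.getD_cons_zero, List.take_zero, List.sum_nil]
    refine ⟨?_, by ring⟩
    split_ifs with h
    · ring
    · ring

-- guarded sum over all indices = plain sum over indices 1 .. m-1 (for m ≤ n)
lemma pv_rangeFilter (ls : List Int) (n m : Nat) (hmn : m ≤ n) :
    ((List.range n).map (fun (i : Nat) =>
        if 1 ≤ (0 : Int) + (i : Int) ∧ (0 : Int) + (i : Int) < (m : Int) then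
          6 * ls.getD i 0 * ((0 : Int) + (ls.take i).sum) + 3 * ls.getD i 0
        else 0)).sum
    = ((List.range (m - 1)).map (fun k => pvG ls (k + 1))).sum := by
  have hsplit : n = m + (n - m) := by omega
  rw [hsplit, List.range_add, List.map_append, List.sum_append]
  have h2 : ((List.range (n - m)).map (fun j =>
        (fun (i : Nat) =>
          if 1 ≤ (0 : Int) + (i : Int) ∧ (0 : Int) + (i : Int) < (m : Int) then
            6 * ls.getD i 0 * ((0 : Int) + (ls.take i).sum) + 3 * ls.getD i 0
          else 0) (m + j))) = (List.range (n - m)).map (fun _ => (0 : Int)) := by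
    refine List.map_congr_left (fun j _ => ?_)
    have hcond : ¬ (1 ≤ (0 : Int) + ((m + j : Nat) : Int)
        ∧ (0 : Int) + ((m + j : Nat) : Int) < (m : Int)) := by
      push_cast; omega
    simp only [if_neg hcond]
  rw [List.map_map, Function.comp_def, h2]
  have hz : ((List.range (n - m)).map (fun _ => (0 : Int))).sum = 0 := by simp
  rw [hz, add_zero]
  rcases Nat.eq_zero_or_pos m with hm | hm
  · subst hm; simp
  · have hm1 : m = (m - 1) + 1 := by omega
    rw [hm1, List.range_succ_eq_map, List.map_cons, List.sum_cons, List.map_map, Function.comp_def]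
    have h0 : ¬ (1 ≤ (0 : Int) + ((0 : Nat) : Int)
        ∧ (0 : Int) + ((0 : Nat) : Int) < ((m - 1 + 1 : Nat) : Int)) := by simp
    rw [if_neg h0, zero_add, Nat.add_sub_cancel]
    refine congrArg List.sum (List.map_congr_left (fun k hk => ?_))
    rw [List.mem_range] at hk
    have hc : (1 ≤ (0 : Int) + ((Nat.succ k : Nat) : Int)
        ∧ (0 : Int) + ((Nat.succ k : Nat) : Int) < ((m - 1 + 1 : Nat) : Int)) := by
      push_cast; omega
    rw [if_pos hc]
    simp only [pvG, Nat.succ_eq_add_one, zero_add]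

-- splitting the 1 .. 2h-1 sum into A's down part (1 .. h) and up part (h+1 .. 2h-1)
lemma pv_splitSum (ls : List Int) (hN : Nat) :
    ((List.range (2 * hN - 1)).map (fun k => pvG ls (k + 1))).sum
    = ((List.range hN).map (fun k => pvG ls (k + 1))).sum
      + ((List.range (hN - 1)).map (fun k => pvG ls (hN + k + 1))).sum := by
  rcases Nat.eq_zero_or_pos hN with h | h
  · subst h; simp
  · have h2 : 2 * hN - 1 = hN + (hN - 1) := by omega
    rw [h2, List.range_add, List.map_append, List.sum_append, List.map_map, Function.comp_def]

-- ===== VERDICT (by name: the statement is the Claim_ definition above) =====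
theorem predict_clarification_dense_params_spec : Claim_equal_predict_clarification_dense_params := by
  intro ls k _ _
  unfold Spec_predict_clarification_dense_params
  unfold predict_clarification_dense_params predict_clarification_dense_params_alt
  dsimp only
  have hh : PySem.Int.floordiv ((ls.length : Nat) : Int) 2 = ((ls.length / 2 : Nat) : Int) := by
    rw [PySem.Int.floordiv_eq_ediv_of_pos (by norm_num : (0:Int) < 2)]
    omega
  rw [hh, pv_upRange (ls.length / 2), pv_pyRange_cast (ls.length / 2)]
  rw [pv_downFold ls (ls.length / 2), pv_upFold ls (ls.length / 2), pv_constFold]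
  rw [pv_foldB (2 * (ls.length / 2)) ls 0]
  dsimp only
  rw [pv_rangeFilter ls ls.length (2 * (ls.length / 2)) (by omega)]
  rw [pv_splitSum ls (ls.length / 2)]
  by_cases hk : k > 1
  · rw [if_pos hk]
    have ht : (((k - 1).toNat : Nat) : Int) = k - 1 := by omega
    rw [ht]
    ring
  · rw [if_neg hk]
    have ht : (((k - 1).toNat : Nat) : Int) = 0 := by omega
    rw [ht]
    ring
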